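-- pv_equiv track=rewrite | github.com/Songhwa-Rossana/ByteDance-youth-training-camp-problems | 49.py | solution
-- ===== SOURCE A (Python) =====
-- def solution(n: int, s: list, x: list) -> list:
--     assert n == len(s) == len(x)
--     start = {}
--     cnt = {}
--     for i in range(n):
--         if s[i] not in start.keys():
--             start[s[i]] = i
--         cnt[s[i]] = cnt.get(s[i], 0) + x[i]
--     a = sorted(cnt.keys(), key=lambda s: (-cnt[s], start[s]))
--     return a
-- ===== SOURCE B (Python) =====
-- def solution(n: int, s: list, x: list) -> list:
--     assert n == len(s) == len(x)
--     cnt = {}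
--     for w, v in zip(s, x):
--         cnt[w] = cnt.get(w, 0) + v
--     res = []
--     remaining = list(cnt)
--     while remaining:
--         best = remaining[0]
--         for w in remaining[1:]:
--             if cnt[w] > cnt[best]:
--                 best = w
--         res.append(best)
--         remaining.remove(best)
--     return res
-- ===== Notes on version B (the rewrite author's own statement) =====
-- stated objective: alternative
-- what changed: B replaces the library sort with a tuple key by repeated first-max extraction: after one counting pass it repeatedly scans the remaining keys for the first key of maximal count, appends it and removes it, needing no start dict, no tuple sort key and no sorted(); it trades the O(k log k) sort for an O(k^2) selection loop.
import Mathlib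
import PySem

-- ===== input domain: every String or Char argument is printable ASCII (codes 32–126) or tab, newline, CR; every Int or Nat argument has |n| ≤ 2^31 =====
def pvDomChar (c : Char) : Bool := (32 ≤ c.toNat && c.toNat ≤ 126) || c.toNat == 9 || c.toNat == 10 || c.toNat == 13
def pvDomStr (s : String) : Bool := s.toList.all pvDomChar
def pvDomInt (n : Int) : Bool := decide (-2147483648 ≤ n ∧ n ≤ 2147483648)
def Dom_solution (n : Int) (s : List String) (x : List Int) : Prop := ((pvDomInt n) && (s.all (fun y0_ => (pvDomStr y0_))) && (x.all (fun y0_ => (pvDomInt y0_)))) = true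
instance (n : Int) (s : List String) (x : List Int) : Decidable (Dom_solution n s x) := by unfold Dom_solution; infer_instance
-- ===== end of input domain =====

-- B replaces A's tuple-key library sort by repeated first-max extraction (a selection loop over the
-- count dict's keys, no start dict and no sorted()); equivalence of the RETURN values is proved.

-- ===== PORT A =====
-- pyGetD is exact here: Pre_solution bounds every index i of range(n); cnt[s]/start[s] in the sort key
-- never miss (every sorted key is in both dicts), so getD _ 0 is exact there too.
def solution (n : Int) (s : List String) (x : List Int) : List String :=
  let r := (PySem.List.pyRange 0 n).foldl
    (fun (p : PySem.Dict String Int × PySem.Dict String Int) i =>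
      (if p.1.contains (PySem.List.pyGetD s i "") then p.1
       else p.1.insert (PySem.List.pyGetD s i "") i,
       p.2.insert (PySem.List.pyGetD s i "")
         (p.2.getD (PySem.List.pyGetD s i "") 0 + PySem.List.pyGetD x i 0)))
    (PySem.Dict.empty, PySem.Dict.empty)
  PySem.List.sorted2 r.2.keys (fun w => -(r.2.getD w 0)) (fun w => r.1.getD w 0) false

-- ===== PORT B =====
-- the inner 'for w in remaining[1:]' scan for the first key of maximal count
def pvPick (cnt : PySem.Dict String Int) (b : String) (l : List String) : String :=
  l.foldl (fun b w => if cnt.getD w 0 > cnt.getD b 0 then w else b) b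

-- the 'while remaining' loop; fuel = initial length only encodes its termination (each pass removes
-- exactly one element). 'remaining.remove(best)' is List.erase (exact: best ∈ remaining always, so
-- Python removes the first occurrence and never raises); cnt[w] is getD _ 0 (w is always a key).
def pvSel (cnt : PySem.Dict String Int) : Nat → List String → List String
  | 0, _ => []
  | _ + 1, [] => []
  | fuel + 1, h :: t =>
      let best := pvPick cnt h t
      best :: pvSel cnt fuel ((h :: t).erase best)

def solution_alt (n : Int) (s : List String) (x : List Int) : List String :=
  let cnt := (s.zip x).foldl (fun d q => d.insert q.1 (d.getD q.1 0 + q.2)) PySem.Dict.empty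
  pvSel cnt cnt.keys.length cnt.keys

-- ===== PRECONDITION & SPEC =====
-- Pre_ is exactly Python's 'assert n == len(s) == len(x)': on other inputs A raises AssertionError.
def Pre_solution (n : Int) (s : List String) (x : List Int) : Prop :=
  n = (s.length : Int) ∧ s.length = x.length
instance (n : Int) (s : List String) (x : List Int) : Decidable (Pre_solution n s x) := by
  unfold Pre_solution; infer_instance
def pvWitness_solution : Int × List String × List Int := (3, ["a", "b", "a"], [1, 5, 2])
def Spec_solution (n : Int) (s : List String) (x : List Int) (out : List String) : Prop := out = solution_alt n s x
instance (n : Int) (s : List String) (x : List Int) (out : List String) : Decidable (Spec_solution n s x out) := by unfold Spec_solution; infer_instance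

-- ===== CLAIM (what is proved, stated in full; the proofs are below) =====
def Claim_equal_solution : Prop := ∀ (n : Int) (s : List String) (x : List Int), Dom_solution n s x → Pre_solution n s x → Spec_solution n s x (solution n s x)

-- ===== LEMMAS AND PROOFS =====

-- the A-loop body, applied to an (index, (word, value)) triple
def pvStep (p : PySem.Dict String Int × PySem.Dict String Int) (q : Int × (String × Int)) :
    PySem.Dict String Int × PySem.Dict String Int :=
  (if p.1.contains q.2.1 then p.1 else p.1.insert q.2.1 q.1,
   p.2.insert q.2.1 (p.2.getD q.2.1 0 + q.2.2))

lemma pvZipGet (s : List String) (x : List Int) (j : Int) (h0 : 0 ≤ j) (h1 : j < (s.length : Int))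
    (hlen : s.length = x.length) :
    PySem.List.pyGetD (s.zip x) j ("", 0) = (PySem.List.pyGetD s j "", PySem.List.pyGetD x j 0) := by
  obtain ⟨k, rfl⟩ := Int.eq_ofNat_of_zero_le h0
  have hk : k < s.length := by exact_mod_cast h1
  rw [PySem.List.pyGetD_natCast, PySem.List.pyGetD_natCast, PySem.List.pyGetD_natCast]
  simp [List.getD_eq_getElem?_getD, hk, hlen ▸ hk]

-- A's range(n) loop is the fold of pvStep over enumerate(zip(s, x))
lemma pvBridge (s : List String) (x : List Int) (hlen : s.length = x.length)
    (init : PySem.Dict String Int × PySem.Dict String Int) :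
    (PySem.List.pyRange 0 (s.length : Int)).foldl
      (fun (p : PySem.Dict String Int × PySem.Dict String Int) i =>
        (if p.1.contains (PySem.List.pyGetD s i "") then p.1
         else p.1.insert (PySem.List.pyGetD s i "") i,
         p.2.insert (PySem.List.pyGetD s i "")
           (p.2.getD (PySem.List.pyGetD s i "") 0 + PySem.List.pyGetD x i 0))) init
    = (PySem.List.enumerate (s.zip x) 0).foldl pvStep init := by
  rw [PySem.List.enumerate_eq_map_pyRange (s.zip x) ("", 0), List.foldl_map]
  have hz : PySem.List.len (s.zip x) = (s.length : Int) := by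
    simp [PySem.List.len, List.length_zip, ← hlen]
  rw [hz]
  apply PySem.List.foldl_congr_mem
  intro acc j hj
  rw [PySem.List.mem_pyRange_one] at hj
  rw [pvZipGet s x j hj.1 hj.2 hlen]
  rfl

-- the cnt component of the A-loop is exactly B's counting fold
lemma pvSnd (l : List (String × Int)) :
    ∀ (k : Int) (p : PySem.Dict String Int × PySem.Dict String Int),
    ((PySem.List.enumerate l k).foldl pvStep p).2
      = l.foldl (fun d q => d.insert q.1 (d.getD q.1 0 + q.2)) p.2 := by
  induction l with
  | nil => intro k p; simp [PySem.List.enumerate_nil]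
  | cons q t ih =>
    intro k p
    rw [PySem.List.enumerate_cons, List.foldl_cons, List.foldl_cons, ih]
    rfl

def pvInv (p : PySem.Dict String Int × PySem.Dict String Int) (k : Int) : Prop :=
  p.1.keys = p.2.keys ∧
  p.2.keys.Pairwise (fun a b => p.1.getD a 0 < p.1.getD b 0) ∧
  ∀ a ∈ p.2.keys, p.1.getD a 0 < k

lemma pvInvStep (p : PySem.Dict String Int × PySem.Dict String Int) (k : Int) (w : String) (v : Int)
    (h : pvInv p k) : pvInv (pvStep p (k, (w, v))) (k + 1) := by
  obtain ⟨hk, hpw, hb⟩ := h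
  unfold pvInv pvStep
  by_cases hc : p.1.contains w = true
  · have hc2 : p.2.contains w = true := by
      rw [PySem.Dict.contains_iff_mem_keys] at *; rw [← hk]; exact hc
    simp only [hc, if_pos, PySem.Dict.keys_insert_of_contains _ _ hc2]
    refine ⟨hk, hpw, fun a ha => lt_trans (hb a ha) (by omega)⟩
  · have hc' : p.1.contains w = false := by simpa using hc
    have hc2 : p.2.contains w = false := by
      rw [Bool.eq_false_iff] at *
      intro hmem; apply hc'
      rw [PySem.Dict.contains_iff_mem_keys] at *; rw [hk]; exact hmem
    have hwk : w ∉ p.2.keys := by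
      intro hm; rw [← PySem.Dict.contains_iff_mem_keys] at hm; rw [hc2] at hm; exact absurd hm (by simp)
    simp only [hc, if_neg, Bool.false_eq_true, not_false_iff,
      PySem.Dict.keys_insert_of_not_contains _ _ hc',
      PySem.Dict.keys_insert_of_not_contains _ _ hc2]
    have hgd : ∀ a ∈ p.2.keys, (p.1.insert w k).getD a 0 = p.1.getD a 0 := by
      intro a ha
      have : a ≠ w := fun he => hwk (he ▸ ha)
      rw [PySem.Dict.getD_insert]; simp [this]
    have hgw : (p.1.insert w k).getD w 0 = k := by rw [PySem.Dict.getD_insert]; simp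
    refine ⟨by rw [hk], ?_, ?_⟩
    · rw [List.pairwise_append]
      refine ⟨hpw.imp_of_mem ?_, by simp, ?_⟩
      · intro a b ha hb' hlt; rw [hgd a ha, hgd b hb']; exact hlt
      · intro a ha b hb'
        simp at hb'; subst hb'
        rw [hgd a ha, hgw]; exact hb a ha
    · intro a ha
      rcases List.mem_append.mp ha with ha | ha
      · rw [hgd a ha]; exact lt_trans (hb a ha) (by omega)
      · simp at ha; subst ha; rw [hgw]; omega

lemma pvInvFold (l : List (String × Int)) :
    ∀ (k : Int) (p : PySem.Dict String Int × PySem.Dict String Int),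
    pvInv p k → pvInv ((PySem.List.enumerate l k).foldl pvStep p) (k + l.length) := by
  induction l with
  | nil => intro k p h; simpa [PySem.List.enumerate_nil] using h
  | cons q t ih =>
    intro k p h
    rw [PySem.List.enumerate_cons, List.foldl_cons]
    have := ih (k + 1) (pvStep p (k, q)) (pvInvStep p k q.1 q.2 h)
    simpa [add_assoc, add_comm, add_left_comm] using this

lemma pvInsertByCongr {α : Type} (b1 b2 : α → α → Bool) (z : α) :
    ∀ (ys : List α), (∀ y ∈ ys, b1 z y = b2 z y) →
    PySem.List.insertBy b1 z ys = PySem.List.insertBy b2 z ys := by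
  intro ys
  induction ys with
  | nil => intro _; rfl
  | cons y t ih =>
    intro h
    simp only [PySem.List.insertBy]
    rw [h y (by simp)]
    by_cases hb : b2 z y = true
    · simp [hb]
    · simp only [hb, if_neg, Bool.false_eq_true, not_false_iff]
      have := ih (fun a ha => h a (by simp [ha]))
      rw [this]

-- the boolean test of the lexicographic tuple key, as a '<' in Lex (Int × Int)
lemma pvLexBool (p q : Int × Int) :
    decide (toLex p < toLex q)
      = (decide (p.1 < q.1) || (!decide (q.1 < p.1) && decide (p.2 < q.2))) := by
  by_cases h1 : p.1 < q.1 <;> by_cases h2 : q.1 < p.1 <;> by_cases h3 : p.2 < q.2 <;>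
    simp [Prod.Lex.lt_iff, h1, h2, h3] <;> omega

-- sorted with the tuple key (k1, k2) IS sorted with the single Lex-valued key
lemma pvSorted2Lex (xs : List String) (k1 k2 : String → Int) :
    PySem.List.sorted2 xs k1 k2 false
      = PySem.List.sorted xs (fun w => toLex (k1 w, k2 w)) false := by
  rw [PySem.List.sorted_eq_foldl_insertBy]
  apply PySem.List.foldl_congr_mem
  intro acc z _
  apply pvInsertByCongr
  intro y _
  exact (pvLexBool (k1 z, k2 z) (k1 y, k2 y)).symm

-- pvPick returns a member that strictly beats (by count, then by k2-position) every other member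
lemma pvPickSpec (c : PySem.Dict String Int) (k2 : String → Int) :
    ∀ (l : List String) (b : String), (b :: l).Pairwise (fun a b => k2 a < k2 b) →
    pvPick c b l ∈ b :: l ∧
    ∀ w ∈ b :: l, w ≠ pvPick c b l →
      c.getD w 0 < c.getD (pvPick c b l) 0 ∨
      (c.getD w 0 = c.getD (pvPick c b l) 0 ∧ k2 (pvPick c b l) < k2 w) := by
  intro l
  induction l with
  | nil =>
    intro b _
    refine ⟨by simp [pvPick], ?_⟩
    intro w hw hne
    simp [pvPick] at hne ⊢
    simp at hw
    exact absurd hw hne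
  | cons w t ih =>
    intro b hpw
    have hbw : k2 b < k2 w := List.rel_of_pairwise_cons hpw (by simp)
    by_cases hgt : c.getD b 0 < c.getD w 0
    · have hstep : pvPick c b (w :: t) = pvPick c w t := by
        simp [pvPick, hgt]
      rw [hstep]
      obtain ⟨hm, hp⟩ := ih w hpw.of_cons
      have hwr : c.getD w 0 ≤ c.getD (pvPick c w t) 0 := by
        by_cases he : w = pvPick c w t
        · rw [← he]
        · rcases hp w (by simp) he with h | h
          · omega
          · omega
      refine ⟨by simp [List.mem_cons] at hm ⊢; tauto, ?_⟩
      intro w' hw' hne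
      rcases List.mem_cons.mp hw' with rfl | hw'
      · left; omega
      · exact hp w' hw' hne
    · have hstep : pvPick c b (w :: t) = pvPick c b t := by
        simp [pvPick, hgt]
      rw [hstep]
      have hsub : (b :: t).Sublist (b :: w :: t) := (List.sublist_cons_self w t).cons₂ b
      obtain ⟨hm, hp⟩ := ih b (hpw.sublist hsub)
      have hbr : c.getD b 0 ≤ c.getD (pvPick c b t) 0 := by
        by_cases he : b = pvPick c b t
        · rw [← he]
        · rcases hp b (by simp) he with h | h
          · omega
          · omega
      refine ⟨by simp [List.mem_cons] at hm ⊢; tauto, ?_⟩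
      intro w' hw' hne
      rcases List.mem_cons.mp hw' with h | hw2
      · subst h
        exact hp w' (by simp) hne
      · rcases List.mem_cons.mp hw2 with h | hw3
        · subst h
          -- w' is the skipped element : its count ≤ count b ≤ count of the pick
          by_cases hlt : c.getD w' 0 < c.getD (pvPick c b t) 0
          · left; exact hlt
          · right
            have he1 : c.getD w' 0 = c.getD (pvPick c b t) 0 := by omega
            refine ⟨he1, ?_⟩
            by_cases he : b = pvPick c b t
            · rw [← he]; exact hbw
            · rcases hp b (by simp) he with h | h
              · omega
              · exact lt_trans h.2 hbw
        · exact hp w' (by simp [hw3]) hne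

lemma pvNodupOfPairwise (k2 : String → Int) (l : List String)
    (h : l.Pairwise (fun a b => k2 a < k2 b)) : l.Nodup :=
  h.imp (fun hab => by intro he; rw [he] at hab; exact lt_irrefl _ hab)

-- the selection loop returns a permutation of l that is strictly increasing under the Lex key
lemma pvSelSpec (c : PySem.Dict String Int) (k2 : String → Int) :
    ∀ (fuel : Nat) (l : List String), l.length ≤ fuel →
    l.Pairwise (fun a b => k2 a < k2 b) →
    (pvSel c fuel l).Perm l ∧
    (pvSel c fuel l).Pairwise (fun a b =>
      toLex (-(c.getD a 0), k2 a) < toLex (-(c.getD b 0), k2 b)) := by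
  intro fuel
  induction fuel with
  | zero =>
    intro l hl _
    have : l = [] := List.length_eq_zero_iff.mp (Nat.le_zero.mp hl)
    subst this
    exact ⟨List.Perm.refl _, List.Pairwise.nil⟩
  | succ fuel ih =>
    intro l hl hpw
    match l with
    | [] => exact ⟨List.Perm.refl _, List.Pairwise.nil⟩
    | h :: t =>
      obtain ⟨hmem, hbeat⟩ := pvPickSpec c k2 t h hpw
      have hnd : (h :: t).Nodup := pvNodupOfPairwise k2 _ hpw
      have hperm0 : (h :: t).Perm (pvPick c h t :: (h :: t).erase (pvPick c h t)) :=
        List.perm_cons_erase hmem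
      have hsub : ((h :: t).erase (pvPick c h t)).Sublist (h :: t) := List.erase_sublist
      have hlen : ((h :: t).erase (pvPick c h t)).length ≤ fuel := by
        rw [List.length_erase_of_mem hmem]
        simpa using Nat.le_of_succ_le_succ hl
      obtain ⟨hp, hq⟩ := ih ((h :: t).erase (pvPick c h t)) hlen (hpw.sublist hsub)
      have hsel : pvSel c (fuel + 1) (h :: t)
          = pvPick c h t :: pvSel c fuel ((h :: t).erase (pvPick c h t)) := rfl
      rw [hsel]
      constructor
      · exact (hp.cons (pvPick c h t)).trans hperm0.symm
      · refine List.Pairwise.cons ?_ hq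
        intro w hw
        have hw' : w ∈ (h :: t).erase (pvPick c h t) := hp.subset hw
        rw [hnd.mem_erase_iff] at hw'
        rcases hbeat w hw'.2 hw'.1 with hc | hc
        · rw [Prod.Lex.lt_iff]; left; simpa using hc
        · rw [Prod.Lex.lt_iff]; right; exact ⟨by simp [hc.1], hc.2⟩

-- ===== VERDICT (by name: the statement is the Claim_ definition above) =====
theorem solution_spec : Claim_equal_solution := by
  intro n s x _ hpre
  obtain ⟨hn, hlen⟩ := hpre
  unfold Spec_solution solution solution_alt
  subst hn
  rw [pvBridge s x hlen]
  set final := (PySem.List.enumerate (s.zip x) 0).foldl pvStep (PySem.Dict.empty, PySem.Dict.empty) with hf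
  have hsnd : final.2 = (s.zip x).foldl (fun d q => d.insert q.1 (d.getD q.1 0 + q.2)) PySem.Dict.empty := by
    rw [hf, pvSnd]
  have hinv : pvInv final (0 + (s.zip x).length) :=
    pvInvFold (s.zip x) 0 (PySem.Dict.empty, PySem.Dict.empty)
      (by refine ⟨rfl, ?_, ?_⟩ <;> simp [PySem.Dict.keys_empty])
  rw [← hsnd]
  obtain ⟨hp, hq⟩ := pvSelSpec final.2 (fun w => final.1.getD w 0)
    final.2.keys.length final.2.keys (le_refl _) hinv.2.1
  rw [pvSorted2Lex]
  exact PySem.List.sorted_eq_of_perm_of_pairwise_lt _ _ _ hp hq
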